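-- pv_equiv track=rewrite | github.com/shanematley/dotfiles | bin/sanitise-markdown-link.py | sanitize_markdown_links
-- ===== SOURCE A (Python) =====
-- def sanitize_markdown_links(text):
--     result = []
--     i = 0
--     L = len(text)
--     while i < L:
--         # look for start of a link
--         if text[i] == '[':
--             end_text = text.find('](', i)
--             if end_text != -1:
--                 link_text = text[i+1:end_text]
--                 # now parse the URL with balanced-parens
--                 j = end_text + 2
--                 depth = 1
--                 while j < L and depth:
--                     if text[j] == '(':
--                         depth += 1
--                     elif text[j] == ')':
--                         depth -= 1
--                     j += 1
--                 # if we found a matching ')'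
--                 if depth == 0:
--                     url = text[end_text+2 : j-1]
--                     # percent-encode any literal parens in the URL
--                     url_enc = url.replace('(', '%28').replace(')', '%29')
--                     result.append(f"[{link_text}]({url_enc})")
--                     i = j
--                     continue
--         # otherwise, just copy the character
--         result.append(text[i])
--         i += 1
--     return ''.join(result)
-- ===== SOURCE B (Python) =====
-- def _match_close(text, j):
--     # Find the position just past the ')' matching an already-open '(' by
--     # jumping between paren occurrences with str.find (never stepping char
--     # by char); returns None if the parens never balance.
--     depth = 1
--     while depth:
--         q = text.find(')', j)
--         if q == -1:
--             return None
--         p = text.find('(', j)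
--         if p != -1 and p < q:
--             depth += 1
--             j = p + 1
--         else:
--             depth -= 1
--             j = q + 1
--     return j
--
--
-- def sanitize_markdown_links(text):
--     # Jump-scan: hop straight between '[' occurrences with str.find and copy
--     # everything in between as whole slices; the balanced-paren match also
--     # jumps between paren occurrences instead of walking every character.
--     out = []
--     pos = 0
--     while True:
--         k = text.find('[', pos)
--         if k == -1:
--             out.append(text[pos:])
--             break
--         e = text.find('](', k)
--         if e == -1:
--             out.append(text[pos:])
--             break
--         j = _match_close(text, e + 2)
--         if j is None:
--             out.append(text[pos:k + 1])
--             pos = k + 1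
--             continue
--         out.append(text[pos:k])
--         url = text[e + 2:j - 1].translate({ord('('): '%28', ord(')'): '%29'})
--         out.append('[' + text[k + 1:e] + '](' + url + ')')
--         pos = j
--     return ''.join(out)
-- ===== Notes on version B (the rewrite author's own statement) =====
-- stated objective: faster
-- what changed: B replaces A's character-by-character while loop with a jump scan: str.find hops straight to the next opening bracket and the gap is copied as one slice, the balanced-paren match hops between paren occurrences via str.find instead of walking every character, the URL is encoded with str.translate, and when no link separator remains the whole tail is emitted at once instead of re-running find at every later bracket.
import Mathlib
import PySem

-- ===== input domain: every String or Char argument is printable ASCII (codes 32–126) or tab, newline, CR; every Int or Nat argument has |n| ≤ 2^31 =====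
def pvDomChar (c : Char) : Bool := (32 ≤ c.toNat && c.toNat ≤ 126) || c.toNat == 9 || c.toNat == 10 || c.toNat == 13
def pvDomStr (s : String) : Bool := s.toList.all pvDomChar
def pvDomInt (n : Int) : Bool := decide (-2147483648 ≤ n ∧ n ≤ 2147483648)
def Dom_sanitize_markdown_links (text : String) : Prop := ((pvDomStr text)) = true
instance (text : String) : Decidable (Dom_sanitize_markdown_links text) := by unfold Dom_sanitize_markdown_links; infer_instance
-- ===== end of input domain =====

-- B replaces A's per-character loop with a find-driven jump scan (slices between '['
-- occurrences, paren matching by hopping between paren positions, str.translate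
-- encoding); objective: alternative.

-- ===== PORT A =====

-- text.find('](', i) on char lists (hand-ported, exact: fixed two-char needle).
def findPair : List Char → Option Nat
  | [] => none
  | [_] => none
  | a :: b :: rest => if a = ']' ∧ b = '(' then some 0 else (findPair (b :: rest)).map (· + 1)

-- text.find('](', i): none stands for Python's -1.
def findLP (cs : List Char) (i : Nat) : Option Nat := (findPair (cs.drop i)).map (· + i)

-- A's inner balanced-paren while loop: returns (chars consumed, final depth)
def parenScan : List Char → Nat → Nat × Nat
  | _, 0 => (0, 0)
  | [], Nat.succ d => (0, d + 1)
  | c :: rs, Nat.succ d =>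
      let d' := if c = '(' then d + 2 else if c = ')' then d else d + 1
      let r := parenScan rs d'
      (r.1 + 1, r.2)

-- url.replace('(', '%28')  (single-char needle: exact as a flatMap)
def repLP (l : List Char) : List Char := l.flatMap (fun c => if c = '(' then ['%', '2', '8'] else [c])
-- ….replace(')', '%29')
def repRP (l : List Char) : List Char := l.flatMap (fun c => if c = ')' then ['%', '2', '9'] else [c])

-- A's while loop; fuel only makes the recursion structural (i strictly increases each
-- iteration, so cs.length + 1 fuel is never exhausted).
def loopA (cs : List Char) : Nat → Nat → List Char
  | 0, _ => []
  | fuel + 1, i =>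
    if i < cs.length then
      if cs[i]! = '[' then
        match findLP cs i with
        | some p =>
            let r := parenScan (cs.drop (p + 2)) 1
            let j := p + 2 + r.1
            if r.2 = 0 then
              '[' :: ((cs.take p).drop (i + 1)) ++ ']' :: '(' ::
                repRP (repLP ((cs.take (j - 1)).drop (p + 2))) ++ ')' :: loopA cs fuel j
            else cs[i]! :: loopA cs fuel (i + 1)
        | none => cs[i]! :: loopA cs fuel (i + 1)
      else cs[i]! :: loopA cs fuel (i + 1)
    else []

def sanitize_markdown_links (text : String) : String :=
  let cs := text.toList
  String.ofList (loopA cs (cs.length + 1) 0)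

-- ===== PORT B =====

-- text.find(c, j) for a single character c: none stands for Python's -1.
def findCharFrom (cs : List Char) (c : Char) (j : Nat) : Option Nat :=
  ((cs.drop j).findIdx? (· = c)).map (· + j)

-- B's _match_close: hop between paren occurrences; fuel only makes it structural
-- (j strictly increases each iteration, so cs.length + 1 fuel is never exhausted).
def matchClose (cs : List Char) : Nat → Nat → Nat → Option Nat
  | 0, _, _ => none
  | fuel + 1, j, depth =>
    if depth = 0 then some j
    else
      match findCharFrom cs ')' j with
      | none => none
      | some q =>
        match findCharFrom cs '(' j with
        | some p =>
          if p < q then matchClose cs fuel (p + 1) (depth + 1)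
          else matchClose cs fuel (q + 1) (depth - 1)
        | none => matchClose cs fuel (q + 1) (depth - 1)

-- str.translate({'(': '%28', ')': '%29'}): per-char mapping, exact as a flatMap.
def transEnc (l : List Char) : List Char :=
  l.flatMap (fun c =>
    if c = '(' then ['%', '2', '8'] else if c = ')' then ['%', '2', '9'] else [c])

-- B's outer while loop; fuel structural as above (pos strictly increases).
-- All Python slices here have 0 ≤ lo ≤ hi ≤ len, so take/drop is exact.
def loopB (cs : List Char) : Nat → Nat → List Char
  | 0, _ => []
  | fuel + 1, pos =>
    match findCharFrom cs '[' pos with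
    | none => cs.drop pos
    | some k =>
      match findLP cs k with
      | none => cs.drop pos
      | some e =>
        match matchClose cs (cs.length + 1) (e + 2) 1 with
        | none => (cs.take (k + 1)).drop pos ++ loopB cs fuel (k + 1)
        | some j =>
          (cs.take k).drop pos ++ '[' :: ((cs.take e).drop (k + 1)) ++ ']' :: '(' ::
            transEnc ((cs.take (j - 1)).drop (e + 2)) ++ ')' :: loopB cs fuel j

def sanitize_markdown_links_alt (text : String) : String :=
  let cs := text.toList
  String.ofList (loopB cs (cs.length + 1) 0)

-- ===== PRECONDITION & SPEC =====
def Spec_sanitize_markdown_links (text : String) (out : String) : Prop := out = sanitize_markdown_links_alt text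
instance (text : String) (out : String) : Decidable (Spec_sanitize_markdown_links text out) := by unfold Spec_sanitize_markdown_links; infer_instance

-- ===== CLAIM (what is proved, stated in full; the proofs are below) =====
def Claim_equal_sanitize_markdown_links : Prop := ∀ (text : String), Dom_sanitize_markdown_links text → Spec_sanitize_markdown_links text (sanitize_markdown_links text)


-- ===== LEMMAS AND PROOFS =====

-- ---- encoding: A's two replace passes = B's translate ----
theorem enc_eq (l : List Char) : repRP (repLP l) = transEnc l := by
  induction l with
  | nil => rfl
  | cons c rest ih =>
    by_cases h1 : c = '('
    · simp [repLP, repRP, transEnc, h1, List.flatMap_cons] at ih ⊢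
      simpa [repRP, repLP] using ih
    · by_cases h2 : c = ')'
      · simp [repLP, repRP, transEnc, h2, List.flatMap_cons] at ih ⊢
        simpa [repRP, repLP] using ih
      · simp [repLP, repRP, transEnc, h1, h2, List.flatMap_cons] at ih ⊢
        simpa [repRP, repLP] using ih

-- ---- findCharFrom characterisation ----
theorem fc_none {cs : List Char} {c : Char} {pos : Nat}
    (h : findCharFrom cs c pos = none) :
    ∀ m, pos ≤ m → m < cs.length → cs[m]! ≠ c := by
  intro m hpm hm
  unfold findCharFrom at h
  rw [Option.map_eq_none_iff, List.findIdx?_eq_none_iff] at h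
  have hmem : cs[m]! ∈ cs.drop pos := by
    rw [getElem!_pos cs m hm]
    rw [List.mem_iff_getElem]
    exact ⟨m - pos, by simp; omega, by rw [List.getElem_drop]; congr 1; omega⟩
  have := h _ hmem
  simpa using this

theorem fc_some {cs : List Char} {c : Char} {pos k : Nat}
    (h : findCharFrom cs c pos = some k) :
    pos ≤ k ∧ k < cs.length ∧ cs[k]! = c ∧ ∀ m, pos ≤ m → m < k → cs[m]! ≠ c := by
  unfold findCharFrom at h
  obtain ⟨t, ht, rfl⟩ := Option.map_eq_some_iff.mp h
  rw [List.findIdx?_eq_some_iff_getElem] at ht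
  obtain ⟨hlt, hp, hprev⟩ := ht
  have hlen : t + pos < cs.length := by simp at hlt; omega
  have hp' : cs[pos + t] = c := by simpa [List.getElem_drop] using hp
  refine ⟨by omega, hlen, ?_, ?_⟩
  · rw [show t + pos = pos + t from by omega, getElem!_pos cs _ (by omega)]
    exact hp'
  · intro m hpm hmk
    have hm : m < cs.length := by omega
    have h2 := hprev (m - pos) (by omega)
    have h2' : cs[pos + (m - pos)]'(by omega) ≠ c := by
      simpa [List.getElem_drop] using h2
    have h2'' : cs[pos + (m - pos)]! ≠ c := by
      rw [getElem!_pos cs _ (by omega)]; exact h2'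
    rwa [show pos + (m - pos) = m from by omega] at h2''

-- ---- findLP facts ----
theorem findPair_drop_none (cs : List Char) (h : findPair cs = none) :
    ∀ d, findPair (cs.drop d) = none := by
  induction cs with
  | nil => intro d; simp [List.drop_nil, findPair]
  | cons c rest ih =>
    intro d
    cases d with
    | zero => exact h
    | succ d =>
      rw [List.drop_succ_cons]
      cases rest with
      | nil => simp [findPair]
      | cons b rs =>
        apply ih _ d
        simp only [findPair] at h
        split at h
        · exact absurd h (by simp)
        · simpa using h

theorem findLP_ge {cs : List Char} {i p : Nat} (h : findLP cs i = some p) : i ≤ p := by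
  unfold findLP at h
  obtain ⟨q, _, hq⟩ := Option.map_eq_some_iff.mp h
  omega

theorem findLP_mono_none {cs : List Char} {s i : Nat} (h : findLP cs s = none) (hsi : s ≤ i) :
    findLP cs i = none := by
  have h' : findPair (cs.drop s) = none := by
    unfold findLP at h; simpa using h
  unfold findLP
  have : cs.drop i = (cs.drop s).drop (i - s) := by
    rw [List.drop_drop]; congr 1; omega
  rw [this, findPair_drop_none _ h']
  rfl

-- ---- parenScan: single-step evaluation facts ----
theorem ps_close (rest : List Char) (d : Nat) :
    parenScan (')' :: rest) (d + 1) =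
      ((parenScan rest d).1 + 1, (parenScan rest d).2) := by
  simp [parenScan]

theorem ps_open (rest : List Char) (d : Nat) :
    parenScan ('(' :: rest) (d + 1) =
      ((parenScan rest (d + 2)).1 + 1, (parenScan rest (d + 2)).2) := by
  simp [parenScan]

theorem ps_other {c : Char} (h1 : c ≠ '(') (h2 : c ≠ ')') (rest : List Char) (d : Nat) :
    parenScan (c :: rest) (d + 1) =
      ((parenScan rest (d + 1)).1 + 1, (parenScan rest (d + 1)).2) := by
  simp [parenScan, h1, h2]

theorem ps_skip (seg rest : List Char) (h : ∀ x ∈ seg, x ≠ '(' ∧ x ≠ ')') :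
    ∀ d : Nat, parenScan (seg ++ rest) (d + 1) =
      ((parenScan rest (d + 1)).1 + seg.length, (parenScan rest (d + 1)).2) := by
  induction seg with
  | nil => intro d; simp
  | cons c s ih =>
    intro d
    have hc := h c (by simp)
    have hs : ∀ x ∈ s, x ≠ '(' ∧ x ≠ ')' := fun x hx => h x (by simp [hx])
    rw [List.cons_append, ps_other hc.1 hc.2, ih hs d]
    simp only [List.length_cons, Prod.mk.injEq]
    exact ⟨by omega, trivial⟩

theorem ps_noClose (l : List Char) (h : ∀ x ∈ l, x ≠ ')') :
    ∀ d : Nat, (parenScan l (d + 1)).2 ≠ 0 := by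
  induction l with
  | nil => intro d; simp [parenScan]
  | cons c s ih =>
    intro d
    have hc := h c (by simp)
    have hs : ∀ x ∈ s, x ≠ ')' := fun x hx => h x (by simp [hx])
    by_cases hop : c = '('
    · subst hop
      rw [ps_open]
      exact ih hs (d + 1)
    · rw [ps_other hop hc]
      exact ih hs d

-- membership in a (drop …).take … window, index-wise
theorem mem_window {cs : List Char} {j s : Nat} {x : Char}
    (hx : x ∈ (cs.drop j).take s) :
    ∃ t, t < s ∧ j + t < cs.length ∧ x = cs[j + t]! := by
  obtain ⟨t, ht, hg⟩ := List.mem_iff_getElem.mp hx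
  have hlen : t < s ∧ j + t < cs.length := by
    simp at ht; omega
  refine ⟨t, hlen.1, hlen.2, ?_⟩
  rw [← hg, getElem!_pos cs _ hlen.2]
  rw [List.getElem_take, List.getElem_drop]

-- decompose the suffix at a known position
theorem drop_split {cs : List Char} {j m : Nat} (hjm : j ≤ m) (hm : m < cs.length) :
    cs.drop j = (cs.drop j).take (m - j) ++ cs[m]! :: cs.drop (m + 1) := by
  rw [getElem!_pos cs m hm, ← List.drop_eq_getElem_cons hm]
  have : cs.drop m = (cs.drop j).drop (m - j) := by
    rw [List.drop_drop]; congr 1; omega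
  rw [this, List.take_append_drop]

-- ---- matchClose: one unfolding step ----
theorem mc_step (cs : List Char) (fuel j d : Nat) :
    matchClose cs (fuel + 1) j (d + 1) =
      (match findCharFrom cs ')' j with
       | none => none
       | some q =>
         match findCharFrom cs '(' j with
         | some p => if p < q then matchClose cs fuel (p + 1) (d + 1 + 1)
                     else matchClose cs fuel (q + 1) d
         | none => matchClose cs fuel (q + 1) d) := by
  simp only [matchClose]
  rw [if_neg (by omega : ¬ d + 1 = 0)]
  rfl

theorem ps_zero (l : List Char) : parenScan l 0 = (0, 0) := by
  cases l <;> rfl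

-- ---- matchClose computes exactly A's parenScan outcome ----
theorem mc_eq (cs : List Char) :
    ∀ (fuel j d : Nat), cs.length < j + fuel →
      matchClose cs fuel j (d + 1) =
        (if (parenScan (cs.drop j) (d + 1)).2 = 0
         then some (j + (parenScan (cs.drop j) (d + 1)).1) else none) := by
  intro fuel
  induction fuel with
  | zero =>
    intro j d hj
    rw [List.drop_eq_nil_of_le (by omega : cs.length ≤ j)]
    simp only [matchClose]
    rw [show parenScan ([] : List Char) (d + 1) = (0, d + 1) from rfl]
    simp
  | succ fuel ih =>
    intro j d hj
    rw [mc_step]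
    cases hq : findCharFrom cs ')' j with
    | none =>
      have hnc : ∀ x ∈ cs.drop j, x ≠ ')' := by
        intro x hx
        obtain ⟨t, hlt, rfl⟩ := List.mem_iff_getElem.mp hx
        have hjt : j + t < cs.length := by simp at hlt; omega
        rw [List.getElem_drop]
        have hval := fc_none hq (j + t) (by omega) hjt
        rwa [getElem!_pos cs _ hjt] at hval
      rw [if_neg (ps_noClose _ hnc d)]
    | some q =>
      obtain ⟨hjq, hqlen, hqc, hqprev⟩ := fc_some hq
      dsimp only
      cases hp : findCharFrom cs '(' j with
      | none =>
        dsimp only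
        have hseg : ∀ x ∈ (cs.drop j).take (q - j), x ≠ '(' ∧ x ≠ ')' := by
          intro x hx
          obtain ⟨t, htq, hlt, rfl⟩ := mem_window hx
          exact ⟨fc_none hp (j + t) (by omega) hlt, hqprev (j + t) (by omega) (by omega)⟩
        rw [drop_split hjq hqlen, hqc, ps_skip _ _ hseg d, ps_close]
        cases d with
        | zero =>
          cases fuel with
          | zero => omega
          | succ fuel' =>
            rw [ps_zero]
            simp only [matchClose]
            simp [List.length_take]
            omega
        | succ d' =>
          rw [ih (q + 1) d' (by omega)]
          by_cases hz : (parenScan (cs.drop (q + 1)) (d' + 1)).2 = 0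
          · simp [hz, List.length_take]
            omega
          · simp [hz]
      | some p =>
        obtain ⟨hjp, hplen, hpc, hpprev⟩ := fc_some hp
        dsimp only
        by_cases hpq : p < q
        · rw [if_pos hpq]
          have hseg : ∀ x ∈ (cs.drop j).take (p - j), x ≠ '(' ∧ x ≠ ')' := by
            intro x hx
            obtain ⟨t, htp, hlt, rfl⟩ := mem_window hx
            exact ⟨hpprev (j + t) (by omega) (by omega), hqprev (j + t) (by omega) (by omega)⟩
          rw [drop_split hjp hplen, hpc, ps_skip _ _ hseg d, ps_open]
          have e2 : d + 1 + 1 = d + 2 := by omega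
          have h1 := ih (p + 1) (d + 1) (by omega)
          rw [e2] at h1
          rw [e2, h1]
          by_cases hz : (parenScan (cs.drop (p + 1)) (d + 2)).2 = 0
          · simp [hz, List.length_take]
            omega
          · simp [hz]
        · rw [if_neg hpq]
          have hseg : ∀ x ∈ (cs.drop j).take (q - j), x ≠ '(' ∧ x ≠ ')' := by
            intro x hx
            obtain ⟨t, htq, hlt, rfl⟩ := mem_window hx
            exact ⟨hpprev (j + t) (by omega) (by omega), hqprev (j + t) (by omega) (by omega)⟩
          rw [drop_split hjq hqlen, hqc, ps_skip _ _ hseg d, ps_close]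
          cases d with
          | zero =>
            cases fuel with
            | zero => omega
            | succ fuel' =>
              rw [ps_zero]
              simp only [matchClose]
              simp [List.length_take]
              omega
          | succ d' =>
            rw [ih (q + 1) d' (by omega)]
            by_cases hz : (parenScan (cs.drop (q + 1)) (d' + 1)).2 = 0
            · simp [hz, List.length_take]
              omega
            · simp [hz]

-- ---- loopA: enough fuel means the fuel does not matter ----
theorem loopA_fuel (cs : List Char) :
    ∀ (f1 f2 i : Nat), cs.length < i + f1 → cs.length < i + f2 →
      loopA cs f1 i = loopA cs f2 i := by
  intro f1
  induction f1 with
  | zero =>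
    intro f2 i h1 _
    cases f2 with
    | zero => rfl
    | succ f2 => simp only [loopA, if_neg (by omega : ¬ i < cs.length)]
  | succ f1 ih =>
    intro f2 i h1 h2
    cases f2 with
    | zero =>
      simp only [loopA, if_neg (by omega : ¬ i < cs.length)]
    | succ f2 =>
      simp only [loopA]
      by_cases hi : i < cs.length
      · simp only [if_pos hi]
        by_cases hc : cs[i]! = '['
        · simp only [if_pos hc]
          cases hf : findLP cs i with
          | none => rw [ih f2 (i + 1) (by omega) (by omega)]
          | some p =>
            have hip : i ≤ p := findLP_ge hf
            dsimp only
            by_cases hz : (parenScan (cs.drop (p + 2)) 1).2 = 0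
            · simp only [if_pos hz]
              rw [ih f2 (p + 2 + (parenScan (cs.drop (p + 2)) 1).1) (by omega) (by omega)]
            · simp only [if_neg hz]
              rw [ih f2 (i + 1) (by omega) (by omega)]
        · simp only [if_neg hc]
          rw [ih f2 (i + 1) (by omega) (by omega)]
      · simp only [if_neg hi]

-- ---- loopA copies a bracket-free stretch verbatim ----
theorem loopA_skip (cs : List Char) :
    ∀ (fuel pos k : Nat), pos ≤ k → k ≤ cs.length →
      (∀ m, pos ≤ m → m < k → cs[m]! ≠ '[') → cs.length < pos + fuel →
      loopA cs fuel pos = (cs.drop pos).take (k - pos) ++ loopA cs fuel k := by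
  intro fuel
  induction fuel with
  | zero => intro pos k h1 h2 _ h4; omega
  | succ fuel ih =>
    intro pos k hpk hklen hnb hfuel
    by_cases hpos : pos = k
    · subst hpos; simp
    · have hplt : pos < k := by omega
      have hplen : pos < cs.length := by omega
      have step : loopA cs (fuel + 1) pos = cs[pos]! :: loopA cs fuel (pos + 1) := by
        simp only [loopA, if_pos hplen, if_neg (hnb pos (le_refl _) hplt)]
      rw [step]
      rw [ih (pos + 1) k (by omega) hklen (fun m hm hmk => hnb m (by omega) hmk) (by omega)]
      rw [loopA_fuel cs fuel (fuel + 1) k (by omega) (by omega)]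
      have hdec : cs.drop pos = cs[pos]! :: cs.drop (pos + 1) := by
        rw [getElem!_pos cs pos hplen]; exact List.drop_eq_getElem_cons hplen
      rw [hdec]
      rw [show k - pos = (k - (pos + 1)) + 1 from by omega]
      simp [List.take_succ_cons]

-- ---- when no further link can start, loopA copies the whole tail ----
theorem loopA_tail (cs : List Char) :
    ∀ (fuel pos : Nat), cs.length < pos + fuel →
      (∀ m, pos ≤ m → m < cs.length → cs[m]! = '[' → findLP cs m = none) →
      loopA cs fuel pos = cs.drop pos := by
  intro fuel
  induction fuel with
  | zero =>
    intro pos h _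
    rw [List.drop_eq_nil_of_le (by omega)]
    rfl
  | succ fuel ih =>
    intro pos hfuel hnl
    by_cases hpos : pos < cs.length
    · have htail : cs.drop pos = cs[pos]! :: cs.drop (pos + 1) := by
        rw [getElem!_pos cs pos hpos]; exact List.drop_eq_getElem_cons hpos
      have hrec := ih (pos + 1) (by omega) (fun m hm hml => hnl m (by omega) hml)
      by_cases hc : cs[pos]! = '['
      · simp only [loopA, if_pos hpos, if_pos hc, hnl pos (le_refl _) hpos hc]
        rw [hrec, htail]
      · simp only [loopA, if_pos hpos, if_neg hc]
        rw [hrec, htail]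
    · simp only [loopA, if_neg hpos]
      rw [List.drop_eq_nil_of_le (by omega)]

-- ---- main loop equivalence ----
theorem loopB_eq_loopA (cs : List Char) :
    ∀ (fuel pos : Nat), cs.length < pos + fuel → loopB cs fuel pos = loopA cs fuel pos := by
  intro fuel
  induction fuel with
  | zero => intro pos h; rfl
  | succ fuel ih =>
    intro pos hfuel
    simp only [loopB]
    cases hk : findCharFrom cs '[' pos with
    | none =>
      rw [loopA_tail cs (fuel + 1) pos hfuel
        (fun m hm hml hc => absurd hc (fc_none hk m hm hml))]
    | some k =>
      obtain ⟨hpk, hklen, hkc, hkprev⟩ := fc_some hk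
      cases he : findLP cs k with
      | none =>
        have hA : loopA cs (fuel + 1) pos = cs.drop pos := by
          apply loopA_tail cs (fuel + 1) pos hfuel
          intro m hm hml hc
          by_cases hmk : m < k
          · exact absurd hc (hkprev m hm hmk)
          · exact findLP_mono_none he (by omega)
        rw [hA]
        simp [he]
      | some e =>
        have hke : k ≤ e := findLP_ge he
        rw [loopA_skip cs (fuel + 1) pos k hpk (by omega) hkprev hfuel]
        have hstepA : loopA cs (fuel + 1) k =
            (if (parenScan (cs.drop (e + 2)) 1).2 = 0 then
              '[' :: ((cs.take e).drop (k + 1)) ++ ']' :: '(' ::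
                repRP (repLP ((cs.take (e + 2 + (parenScan (cs.drop (e + 2)) 1).1 - 1)).drop (e + 2))) ++
                ')' :: loopA cs fuel (e + 2 + (parenScan (cs.drop (e + 2)) 1).1)
            else cs[k]! :: loopA cs fuel (k + 1)) := by
          simp only [loopA]
          rw [if_pos hklen, if_pos hkc]
          simp [he]
        rw [hstepA]
        have hmc := mc_eq cs (cs.length + 1) (e + 2) 0 (by omega)
        simp only [Nat.zero_add] at hmc
        simp only [he]
        rw [hmc]
        by_cases hz : (parenScan (cs.drop (e + 2)) 1).2 = 0
        · rw [if_pos hz]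
          dsimp only
          rw [if_pos hz]
          rw [ih (e + 2 + (parenScan (cs.drop (e + 2)) 1).1) (by omega), enc_eq]
          simp [List.drop_take]
        · rw [if_neg hz]
          dsimp only
          rw [if_neg hz]
          rw [ih (k + 1) (by omega), hkc]
          have hsplit : (cs.take (k + 1)).drop pos =
              (cs.drop pos).take (k - pos) ++ ['['] := by
            rw [List.drop_take, show k + 1 - pos = (k - pos) + 1 from by omega,
              List.take_add_one]
            congr 1
            rw [List.getElem?_drop, show pos + (k - pos) = k from by omega,
              List.getElem?_eq_getElem hklen]
            rw [getElem!_pos cs k hklen] at hkc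
            rw [hkc]
            rfl
          rw [hsplit]
          simp

-- ===== VERDICT (by name: the statement is the Claim_ definition above) =====
theorem sanitize_markdown_links_spec : Claim_equal_sanitize_markdown_links := by
  intro text _
  unfold Spec_sanitize_markdown_links
  simp only [sanitize_markdown_links, sanitize_markdown_links_alt]
  rw [loopB_eq_loopA _ _ _ (by omega)]
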